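-- pv_equiv track=rewrite | github.com/victorpedrocs/desafio-entidade-valor | entidadeValor.py | entidadesAtivas
-- ===== SOURCE A (Python) =====
-- from itertools import groupby
--
-- def elementosCardinalidadeOne(atributo, fatos):
--     lista_retorno = []
--     lista_one = list( filter( lambda x: x[1] == atributo[0], fatos ) )
--
--     remocoes = list( filter( lambda x: not x[-1], lista_one ) )
--     for remove in remocoes:
--         lista_one = list( filter( lambda x: x[2] != remove[2], lista_one ) )
--
--     for k, g in groupby( lista_one, lambda x: x[1] ):
--         lista_retorno.append( list(g)[-1] )
--
--     return lista_retorno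
--
-- def elementosCardinalidadeMany( atributo, fatos):
--     lista_many = list( filter( lambda x: x[1] == atributo[0], fatos ) )
--     remocoes = list( filter( lambda x: not x[-1], lista_many ) )
--     for remove in remocoes:
--         lista_many = list( filter( lambda x: x[2] != remove[2], lista_many ) )
--     return lista_many
--
-- def entidadesAtivas(fatos, schema):
--     lista_retorno = []
--     fatos.sort(key=lambda x: x[0])
--     for k, g in groupby( fatos, lambda x: x[0] ):
--         entidades = list(g)
--         for atributo in schema:
--             if atributo[2] == 'one':
--                 lista_retorno.extend( elementosCardinalidadeOne(atributo, entidades) )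
--             else:
--                 lista_retorno.extend( elementosCardinalidadeMany(atributo, entidades) )
--
--     return lista_retorno
-- ===== SOURCE B (Python) =====
-- from itertools import groupby
--
-- def entidadesAtivas(fatos, schema):
--     # same in-place sort of `fatos` as the original; equivalence is about the return value
--     fatos.sort(key=lambda x: x[0])
--     lista_retorno = []
--     for _, g in groupby(fatos, lambda x: x[0]):
--         grupo = list(g)
--         # one pass: the retracted (attribute, value) pairs of this entity
--         removidos = {(r[1], r[2]) for r in grupo if not r[3]}
--         for atributo in schema:
--             sel = [f for f in grupo if f[1] == atributo[0] and (f[1], f[2]) not in removidos]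
--             if atributo[2] == 'one':
--                 lista_retorno.extend(sel[-1:])
--             else:
--                 lista_retorno.extend(sel)
--     return lista_retorno
-- ===== Notes on version B (the rewrite author's own statement) =====
-- stated objective: faster
-- what changed: B builds one set of retracted (attribute, value) pairs per entity group and filters each attribute's facts in a single comprehension (taking sel[-1:] for cardinality 'one'), instead of A's per-removal full refiltering loop and inner groupby inside two helper functions.
import Mathlib
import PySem

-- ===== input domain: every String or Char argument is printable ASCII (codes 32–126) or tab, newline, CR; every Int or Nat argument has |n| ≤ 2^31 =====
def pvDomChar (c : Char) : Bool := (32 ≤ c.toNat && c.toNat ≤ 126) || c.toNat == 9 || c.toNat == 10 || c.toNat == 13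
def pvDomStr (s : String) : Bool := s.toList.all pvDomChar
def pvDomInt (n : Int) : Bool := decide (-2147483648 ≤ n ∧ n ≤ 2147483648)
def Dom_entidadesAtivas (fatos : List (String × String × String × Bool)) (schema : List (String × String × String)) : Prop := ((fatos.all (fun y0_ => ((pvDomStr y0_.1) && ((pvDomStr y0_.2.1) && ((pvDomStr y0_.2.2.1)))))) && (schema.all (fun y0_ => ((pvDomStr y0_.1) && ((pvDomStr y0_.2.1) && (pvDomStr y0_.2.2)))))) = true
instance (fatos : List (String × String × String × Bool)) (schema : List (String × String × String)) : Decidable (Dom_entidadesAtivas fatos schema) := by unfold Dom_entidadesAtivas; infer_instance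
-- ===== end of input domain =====

-- B replaces A's per-removal refiltering loop by one retracted-(attribute, value) set per entity group,
-- and the inner groupby of the 'one' case by taking sel[-1:]. Both A and B sort `fatos` in place
-- (the same mutation); the equivalence proved here is about the return value.

-- ===== PORT A =====

-- itertools.groupby(xs, key): contiguous groups, group key = key of its first element
def pyGroupBy {α κ : Type} [BEq κ] (key : α → κ) : List α → List (κ × List α)
  | [] => []
  | x :: xs =>
    match pyGroupBy key xs with
    | [] => [(key x, [x])]
    | (k, g) :: rest =>
      if key x == k then (key x, x :: g) :: rest else (key x, [x]) :: (k, g) :: rest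

def elementosCardinalidadeOne (atributo : String × String × String)
    (fatos : List (String × String × String × Bool)) : List (String × String × String × Bool) :=
  let listaOne := fatos.filter (fun x => x.2.1 == atributo.1)
  let remocoes := listaOne.filter (fun x => !x.2.2.2)
  let listaOne := remocoes.foldl (fun l remove => l.filter (fun x => x.2.2.1 != remove.2.2.1)) listaOne
  (pyGroupBy (fun x => x.2.1) listaOne).foldl
    (fun acc kg =>
      -- list(g)[-1]: the groups of pyGroupBy are nonempty, so pyGet? is always `some` here
      match PySem.List.pyGet? kg.2 (-1) with
      | some y => acc ++ [y]
      | none => acc) []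

def elementosCardinalidadeMany (atributo : String × String × String)
    (fatos : List (String × String × String × Bool)) : List (String × String × String × Bool) :=
  let listaMany := fatos.filter (fun x => x.2.1 == atributo.1)
  let remocoes := listaMany.filter (fun x => !x.2.2.2)
  remocoes.foldl (fun l remove => l.filter (fun x => x.2.2.1 != remove.2.2.1)) listaMany

def entidadesAtivas (fatos : List (String × String × String × Bool)) (schema : List (String × String × String)) : List (String × String × String × Bool) :=
  let fatosSorted := PySem.List.sorted fatos (fun x => x.1)
  (pyGroupBy (fun x => x.1) fatosSorted).foldl
    (fun acc kg =>
      schema.foldl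
        (fun acc atributo =>
          if atributo.2.2 == "one" then acc ++ elementosCardinalidadeOne atributo kg.2
          else acc ++ elementosCardinalidadeMany atributo kg.2) acc) []

-- ===== PORT B =====

def entidadesAtivas_alt (fatos : List (String × String × String × Bool)) (schema : List (String × String × String)) : List (String × String × String × Bool) :=
  let fatosSorted := PySem.List.sorted fatos (fun x => x.1)
  (pyGroupBy (fun x => x.1) fatosSorted).foldl
    (fun acc kg =>
      let grupo := kg.2
      let removidos : PySem.Set (String × String) :=
        PySem.Set.ofList ((grupo.filter (fun r => !r.2.2.2)).map (fun r => (r.2.1, r.2.2.1)))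
      schema.foldl
        (fun acc atributo =>
          let sel := grupo.filter
            (fun f => f.2.1 == atributo.1 && !(removidos.contains (f.2.1, f.2.2.1)))
          if atributo.2.2 == "one" then acc ++ PySem.List.slice sel (some (-1)) none
          else acc ++ sel) acc) []

-- ===== PRECONDITION & SPEC =====
def Spec_entidadesAtivas (fatos : List (String × String × String × Bool)) (schema : List (String × String × String)) (out : List (String × String × String × Bool)) : Prop := out = entidadesAtivas_alt fatos schema
instance (fatos : List (String × String × String × Bool)) (schema : List (String × String × String)) (out : List (String × String × String × Bool)) : Decidable (Spec_entidadesAtivas fatos schema out) := by unfold Spec_entidadesAtivas; infer_instance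

-- ===== CLAIM (what is proved, stated in full; the proofs are below) =====
def Claim_equal_entidadesAtivas : Prop := ∀ (fatos : List (String × String × String × Bool)) (schema : List (String × String × String)), Dom_entidadesAtivas fatos schema → Spec_entidadesAtivas fatos schema (entidadesAtivas fatos schema)

-- ===== LEMMAS AND PROOFS =====

-- A's chain "for remove in remocoes: l = filter(x != remove)" is one filter by an `all`
theorem pv_foldl_filter {α β : Type} (p : α → β → Bool) :
    ∀ (rs : List β) (l : List α),
      rs.foldl (fun l r => l.filter (fun x => p x r)) l = l.filter (fun x => rs.all (fun r => p x r)) := by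
  intro rs
  induction rs with
  | nil => intro l; simp
  | cons r rs ih =>
    intro l
    simp only [List.foldl_cons, ih, List.filter_filter]
    apply List.filter_congr
    intro x _
    simp [Bool.and_comm]

-- the surviving facts of a group, for attribute a: A's iterated refiltering = B's sel
theorem pv_survivors_eq (a : String × String × String) (g : List (String × String × String × Bool)) :
    ((g.filter (fun x => x.2.1 == a.1)).filter (fun x => !x.2.2.2)).foldl
        (fun l remove => l.filter (fun x => x.2.2.1 != remove.2.2.1))
        (g.filter (fun x => x.2.1 == a.1))
      = g.filter (fun f => f.2.1 == a.1 &&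
          !((PySem.Set.ofList ((g.filter (fun r => !r.2.2.2)).map (fun r => (r.2.1, r.2.2.1)))).contains
              (f.2.1, f.2.2.1))) := by
  rw [pv_foldl_filter, List.filter_filter]
  apply List.filter_congr
  intro x _
  by_cases hx : x.2.1 = a.1
  · apply Bool.coe_iff_coe.mp
    simp [PySem.Set.mem_ofList, List.all_eq_true, hx, Prod.ext_iff]
    constructor
    · intro h a1 hm
      rcases h _ _ _ hm with h' | h' <;> simp_all
    · intro h r1 r2 r3 hm
      by_cases h2 : r2 = a.1
      · subst h2
        by_cases h3 : x.2.2.1 = r3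
        · subst h3; exact absurd hm (h r1)
        · exact Or.inr h3
      · exact Or.inl h2
  · have hb : (x.2.1 == a.1) = false := beq_eq_false_iff_ne.mpr hx
    rw [hb]
    simp

-- pyGroupBy of a list whose keys are all k is the single group (k, l)
theorem pv_pyGroupBy_const {α : Type} (key : α → String) (k : String) :
    ∀ (l : List α), l ≠ [] → (∀ x ∈ l, key x = k) → pyGroupBy key l = [(k, l)] := by
  intro l
  induction l with
  | nil => intro h; exact absurd rfl h
  | cons x xs ih =>
    intro _ hall
    by_cases hne : xs = []
    · subst hne
      simp [pyGroupBy, hall x (by simp)]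
    · have hx := hall x (by simp)
      have := ih hne (fun y hy => hall y (by simp [hy]))
      simp [pyGroupBy, this, hx]

-- the 'one' branch: groupby-then-last over the survivors = sel[-1:]
theorem pv_one_branch (l : List (String × String × String × Bool)) (a : String)
    (hall : ∀ x ∈ l, x.2.1 = a) :
    (pyGroupBy (fun x => x.2.1) l).foldl
        (fun acc kg =>
          match PySem.List.pyGet? kg.2 (-1) with
          | some y => acc ++ [y]
          | none => acc) []
      = PySem.List.slice l (some (-1)) none := by
  by_cases hne : l = []
  · subst hne; simp [pyGroupBy, PySem.List.slice_from_neg_one]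
  · rw [pv_pyGroupBy_const (fun x => x.2.1) a l hne hall]
    simp only [List.foldl_cons, List.foldl_nil, PySem.List.pyGet?_neg_one,
      PySem.List.slice_from_neg_one]
    rw [List.getLast?_eq_some_getLast hne]
    exact (List.drop_length_sub_one hne).symm

theorem pv_foldl_ext {α β : Type} (f g : β → α → β) (h : ∀ b a, f b a = g b a) :
    ∀ (l : List α) (b : β), l.foldl f b = l.foldl g b := by
  intro l
  induction l with
  | nil => intro b; rfl
  | cons x xs ih => intro b; simp only [List.foldl_cons, h, ih]

-- ===== VERDICT (by name: the statement is the Claim_ definition above) =====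
theorem entidadesAtivas_spec : Claim_equal_entidadesAtivas := by
  intro fatos schema _
  unfold Spec_entidadesAtivas entidadesAtivas entidadesAtivas_alt
  apply pv_foldl_ext
  intro acc kg
  apply pv_foldl_ext
  intro acc2 a
  simp only
  split
  · congr 1
    unfold elementosCardinalidadeOne
    simp only
    rw [pv_survivors_eq]
    apply pv_one_branch _ a.1
    intro x hxmem
    have hb := (List.mem_filter.mp hxmem).2
    simp at hb
    exact hb.1
  · congr 1
    unfold elementosCardinalidadeMany
    simp only
    exact pv_survivors_eq a kg.2
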